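-- pv_equiv track=rewrite | github.com/mohammadfaiizan/ProjectI | DSA/Dynamic_Programming/009_dp_stocks.py | max_profit_with_holding_limit
-- ===== SOURCE A (Python) =====
-- from typing import List, Dict, Tuple, Optional
--
-- def max_profit_with_holding_limit(prices: List[int], max_holding_days: int) -> int:
--     """
--     Maximum profit with maximum holding period constraint
--
--     Args:
--         prices: Array of stock prices
--         max_holding_days: Maximum days to hold stock
--
--     Returns:
--         Maximum profit with holding constraint
--     """
--     if not prices or len(prices) < 2 or max_holding_days <= 0:
--         return 0
--
--     n = len(prices)
--     max_profit = 0
--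
--     # For each possible buy day
--     for buy_day in range(n - 1):
--         # Try selling within holding limit
--         max_sell_day = min(buy_day + max_holding_days, n - 1)
--
--         for sell_day in range(buy_day + 1, max_sell_day + 1):
--             profit = prices[sell_day] - prices[buy_day]
--             max_profit = max(max_profit, profit)
--
--     return max_profit
-- ===== SOURCE B (Python) =====
-- def max_profit_with_holding_limit(prices, max_holding_days):
--     if not prices or len(prices) < 2 or max_holding_days <= 0:
--         return 0
--     best = 0
--     for sell in range(1, len(prices)):
--         window = prices[max(0, sell - max_holding_days):sell]
--         best = max(best, prices[sell] - min(window))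
--     return best
-- ===== Notes on version B (the rewrite author's own statement) =====
-- stated objective: faster
-- what changed: Regroups the buy/sell pairs by sell day: one loop over sell days taking min() of the sliced window of earlier prices replaces A's Python-level nested loop over buy then sell days.
import Mathlib
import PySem

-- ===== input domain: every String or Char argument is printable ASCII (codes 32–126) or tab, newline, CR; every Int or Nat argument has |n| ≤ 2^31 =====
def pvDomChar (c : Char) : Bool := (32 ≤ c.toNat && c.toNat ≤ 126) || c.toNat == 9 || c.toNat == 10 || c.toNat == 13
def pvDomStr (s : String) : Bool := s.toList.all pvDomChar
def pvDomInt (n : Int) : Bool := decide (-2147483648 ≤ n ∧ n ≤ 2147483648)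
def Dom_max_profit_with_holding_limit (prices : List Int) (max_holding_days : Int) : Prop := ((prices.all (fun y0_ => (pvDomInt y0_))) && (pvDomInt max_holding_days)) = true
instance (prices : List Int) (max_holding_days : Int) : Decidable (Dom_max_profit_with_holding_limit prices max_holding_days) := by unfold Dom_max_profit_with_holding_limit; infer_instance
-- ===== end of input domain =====

-- B re-groups the same buy/sell pairs by SELL day and takes min() of the sliced price window,
-- removing A's Python-level inner loop (a constant-factor speed-up; same return value).

-- ===== PORT A =====
-- literal transliteration of A: for each buy day, inner loop over sell days within the holding window
def max_profit_with_holding_limit (prices : List Int) (max_holding_days : Int) : Int :=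
  if prices = [] ∨ prices.length < 2 ∨ max_holding_days ≤ 0 then 0
  else
    let n : Int := prices.length
    (PySem.List.pyRange 0 (n - 1) 1).foldl (fun max_profit buy_day =>
      let max_sell_day := min (buy_day + max_holding_days) (n - 1)
      (PySem.List.pyRange (buy_day + 1) (max_sell_day + 1) 1).foldl (fun max_profit sell_day =>
        max max_profit (PySem.List.pyGetD prices sell_day 0 - PySem.List.pyGetD prices buy_day 0))
        max_profit) 0

-- ===== PORT B =====
-- literal transliteration of B: one loop over sell days; min() of the window slice of buy prices
def max_profit_with_holding_limit_alt (prices : List Int) (max_holding_days : Int) : Int :=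
  if prices = [] ∨ prices.length < 2 ∨ max_holding_days ≤ 0 then 0
  else
    (PySem.List.pyRange 1 prices.length 1).foldl (fun best sell =>
      let window := PySem.List.slice prices (some (max 0 (sell - max_holding_days))) (some sell)
      max best (PySem.List.pyGetD prices sell 0 - ((PySem.List.min? window (fun y => y)).getD 0)))
      0

-- ===== PRECONDITION & SPEC =====
def Spec_max_profit_with_holding_limit (prices : List Int) (max_holding_days : Int) (out : Int) : Prop := out = max_profit_with_holding_limit_alt prices max_holding_days
instance (prices : List Int) (max_holding_days : Int) (out : Int) : Decidable (Spec_max_profit_with_holding_limit prices max_holding_days out) := by unfold Spec_max_profit_with_holding_limit; infer_instance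

-- ===== CLAIM (what is proved, stated in full; the proofs are below) =====
def Claim_equal_max_profit_with_holding_limit : Prop := ∀ (prices : List Int) (max_holding_days : Int), Dom_max_profit_with_holding_limit prices max_holding_days → Spec_max_profit_with_holding_limit prices max_holding_days (max_profit_with_holding_limit prices max_holding_days)

-- ===== LEMMAS AND PROOFS =====

-- helper notions used only by the proofs
def pvF (xs : List Int) : Int → Int × Int → Int :=
  fun a p => max a (PySem.List.pyGetD xs p.2 0 - PySem.List.pyGetD xs p.1 0)

def pvLA (xs : List Int) (k : Int) : List (Int × Int) :=
  (PySem.List.pyRange 0 ((xs.length : Int) - 1) 1).flatMap (fun b =>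
    (PySem.List.pyRange (b + 1) (min (b + k) ((xs.length : Int) - 1) + 1) 1).map (fun s => (b, s)))

def pvLB (xs : List Int) (k : Int) : List (Int × Int) :=
  (PySem.List.pyRange 1 (xs.length : Int) 1).flatMap (fun s =>
    (PySem.List.pyRange (max 0 (s - k)) s 1).map (fun b => (b, s)))

theorem pv_minfold (g : Int → Int) (t : List Int) : ∀ (v a c : Int),
    List.foldl (fun a b => max a (c - g b)) (max a (c - v)) t
      = max a (c - List.foldl (fun m b => min m (g b)) v t) := by
  induction t with
  | nil => intro v a c; rfl
  | cons y t ih =>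
    intro v a c
    have h1 : max (max a (c - v)) (c - g y) = max a (c - min v (g y)) := by omega
    simp only [List.foldl_cons, h1, ih]

theorem pv_window_map (xs : List Int) (lo s : Int) (h0 : 0 ≤ lo) (hls : lo ≤ s)
    (hs : s ≤ (xs.length : Int)) :
    PySem.List.slice xs (some lo) (some s)
      = (PySem.List.pyRange lo s 1).map (fun b => PySem.List.pyGetD xs b 0) := by
  rw [PySem.List.slice_toNat xs h0 (le_trans h0 hls)]
  apply List.ext_getElem
  · simp [PySem.List.length_pyRange_one]; omega
  · intro i h1 h2
    have hi : (i : Int) < s - lo := by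
      have := PySem.List.length_pyRange_one lo s
      simp [this] at h2; omega
    simp only [List.getElem_take, List.getElem_drop, List.getElem_map,
      PySem.List.getElem_pyRange_one]
    rw [PySem.List.pyGetD_eq_getElem xs 0 (by omega) (by omega)]
    congr 1
    omega

theorem pv_persell (xs : List Int) (k s : Int) (hk : 1 ≤ k) (hs1 : 1 ≤ s)
    (hsn : s < (xs.length : Int)) (best : Int) :
    max best (PySem.List.pyGetD xs s 0 -
        (PySem.List.min? (PySem.List.slice xs (some (max 0 (s - k))) (some s)) (fun y => y)).getD 0)
      = (PySem.List.pyRange (max 0 (s - k)) s 1).foldl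
          (fun a b => max a (PySem.List.pyGetD xs s 0 - PySem.List.pyGetD xs b 0)) best := by
  have hlo0 : (0 : Int) ≤ max 0 (s - k) := le_max_left _ _
  have hlos : max 0 (s - k) < s := by omega
  rw [pv_window_map xs _ s hlo0 (le_of_lt hlos) (le_of_lt hsn)]
  rw [PySem.List.pyRange_one_cons hlos]
  simp only [List.map_cons, PySem.List.min?_id_cons, Option.getD_some, List.foldl_cons,
    List.foldl_map]
  exact (pv_minfold _ _ _ _ _).symm

theorem pv_A_eq (xs : List Int) (k : Int) :
    (PySem.List.pyRange 0 ((xs.length : Int) - 1) 1).foldl (fun max_profit buy_day =>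
      let max_sell_day := min (buy_day + k) ((xs.length : Int) - 1)
      (PySem.List.pyRange (buy_day + 1) (max_sell_day + 1) 1).foldl (fun max_profit sell_day =>
        max max_profit (PySem.List.pyGetD xs sell_day 0 - PySem.List.pyGetD xs buy_day 0))
        max_profit) 0
      = (pvLA xs k).foldl (pvF xs) 0 := by
  rw [pvLA, List.foldl_flatMap]
  simp only [List.foldl_map, pvF]

theorem pv_B_eq (xs : List Int) (k : Int) (hk : 1 ≤ k) :
    (PySem.List.pyRange 1 (xs.length : Int) 1).foldl (fun best sell =>
      let window := PySem.List.slice xs (some (max 0 (sell - k))) (some sell)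
      max best (PySem.List.pyGetD xs sell 0 - ((PySem.List.min? window (fun y => y)).getD 0))) 0
      = (pvLB xs k).foldl (pvF xs) 0 := by
  rw [pvLB, List.foldl_flatMap]
  refine PySem.List.foldl_congr_mem _ _ _ _ ?_
  intro acc s hs
  rw [PySem.List.mem_pyRange_one] at hs
  simp only [List.foldl_map, pvF]
  exact pv_persell xs k s hk hs.1 hs.2 acc

theorem pv_nodup_LA (xs : List Int) (k : Int) : (pvLA xs k).Nodup := by
  rw [pvLA, List.nodup_flatMap]
  constructor
  · intro b _
    exact (PySem.List.nodup_pyRange_one _ _).map (fun s t h => by simpa using congrArg Prod.snd h)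
  · refine (PySem.List.pairwise_lt_pyRange_one _ _).imp ?_
    intro b b' hlt x hx hx'
    simp only [List.mem_map] at hx hx'
    obtain ⟨s, _, rfl⟩ := hx
    obtain ⟨s', _, h⟩ := hx'
    exact absurd (congrArg Prod.fst h).symm (by simp; omega)

theorem pv_nodup_LB (xs : List Int) (k : Int) : (pvLB xs k).Nodup := by
  rw [pvLB, List.nodup_flatMap]
  constructor
  · intro s _
    exact (PySem.List.nodup_pyRange_one _ _).map (fun b b' h => by simpa using congrArg Prod.fst h)
  · refine (PySem.List.pairwise_lt_pyRange_one _ _).imp ?_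
    intro s s' hlt x hx hx'
    simp only [List.mem_map] at hx hx'
    obtain ⟨b, _, rfl⟩ := hx
    obtain ⟨b', _, h⟩ := hx'
    exact absurd (congrArg Prod.snd h).symm (by simp; omega)

theorem pv_perm (xs : List Int) (k : Int) : (pvLA xs k).Perm (pvLB xs k) := by
  rw [List.perm_ext_iff_of_nodup (pv_nodup_LA xs k) (pv_nodup_LB xs k)]
  rintro ⟨b, s⟩
  simp only [pvLA, pvLB, List.mem_flatMap, List.mem_map, PySem.List.mem_pyRange_one,
    Prod.mk.injEq]
  constructor
  · rintro ⟨b', hb', s', hs', rfl, rfl⟩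
    exact ⟨s', by omega, b', by omega, rfl, rfl⟩
  · rintro ⟨s', hs', b', hb', rfl, rfl⟩
    exact ⟨b', by omega, s', by omega, rfl, rfl⟩

theorem pv_main (xs : List Int) (k : Int) (hk : 1 ≤ k) :
    (PySem.List.pyRange 0 ((xs.length : Int) - 1) 1).foldl (fun max_profit buy_day =>
      let max_sell_day := min (buy_day + k) ((xs.length : Int) - 1)
      (PySem.List.pyRange (buy_day + 1) (max_sell_day + 1) 1).foldl (fun max_profit sell_day =>
        max max_profit (PySem.List.pyGetD xs sell_day 0 - PySem.List.pyGetD xs buy_day 0))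
        max_profit) 0
      = (PySem.List.pyRange 1 (xs.length : Int) 1).foldl (fun best sell =>
        let window := PySem.List.slice xs (some (max 0 (sell - k))) (some sell)
        max best (PySem.List.pyGetD xs sell 0 - ((PySem.List.min? window (fun y => y)).getD 0))) 0 := by
  rw [pv_A_eq, pv_B_eq xs k hk]
  have rc : RightCommutative (pvF xs) := ⟨by intro a p q; simp only [pvF]; omega⟩
  exact (pv_perm xs k).foldl_eq 0

-- ===== VERDICT (by name: the statement is the Claim_ definition above) =====
theorem max_profit_with_holding_limit_spec : Claim_equal_max_profit_with_holding_limit := by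
  intro prices k _
  unfold Spec_max_profit_with_holding_limit max_profit_with_holding_limit max_profit_with_holding_limit_alt
  by_cases hg : prices = [] ∨ prices.length < 2 ∨ k ≤ 0
  · simp only [hg, if_true]
  · simp only [hg, if_false]
    exact pv_main prices k (by omega)
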